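-- pv_equiv track=rewrite | github.com/IvanVS140/py_projects | chars_separator/main.py | separate
-- ===== SOURCE A (Python) =====
-- from string import ascii_letters
--
-- def separate(string, symbol):
--     """[separates all letters in a string with user symbol(s)]
--
--     Args:
--         string ([str]): [some string]
--         symbol ([any type]): [symbol-separator]
--
--     Returns:
--         [type]: [string with letters separated by a symbol-separator]
--     """
--     result = ''
--     for index, item in enumerate(string):
--         if index == len(string) - 1:
--             result += item
--             return result
--         if item in ascii_letters and string[index + 1] in ascii_letters:
--             result += item + symbol
--         else:
--             result += item
--     return result
-- ===== SOURCE B (Python) =====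
-- from itertools import groupby
-- from string import ascii_letters
--
-- def separate(string, symbol):
--     # split into maximal runs of letters / non-letters; only letter runs
--     # get symbol inserted between their consecutive characters
--     result = ''
--     for is_letter, run in groupby(string, key=lambda c: c in ascii_letters):
--         first = True
--         for c in run:
--             if is_letter and not first:
--                 result += symbol
--             result += c
--             first = False
--     return result
-- ===== Notes on version B (the rewrite author's own statement) =====
-- stated objective: alternative
-- what changed: B splits the string into maximal letter/non-letter runs via itertools.groupby and inserts the symbol only between consecutive characters of a letter run, instead of A's index loop with per-character lookahead string[index+1] and an early return at the last index.
import Mathlib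
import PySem

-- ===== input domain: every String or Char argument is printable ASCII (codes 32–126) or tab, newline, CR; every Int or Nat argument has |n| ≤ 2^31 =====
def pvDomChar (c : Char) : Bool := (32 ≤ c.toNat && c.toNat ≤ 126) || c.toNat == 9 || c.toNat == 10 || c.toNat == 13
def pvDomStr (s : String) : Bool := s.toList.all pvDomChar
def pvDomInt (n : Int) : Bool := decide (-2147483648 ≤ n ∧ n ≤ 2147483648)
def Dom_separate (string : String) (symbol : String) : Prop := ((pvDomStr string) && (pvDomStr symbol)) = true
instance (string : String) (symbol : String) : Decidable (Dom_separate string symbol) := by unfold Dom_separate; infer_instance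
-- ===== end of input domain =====

-- B re-implements A by splitting the string into maximal letter/non-letter runs
-- (itertools.groupby) instead of index-by-index lookahead; objective: alternative decomposition.

-- c in ascii_letters
def pyLetter (c : Char) : Bool := ('a' ≤ c && c ≤ 'z') || ('A' ≤ c && c ≤ 'Z')

-- ===== PORT A =====
-- the 'for index, item in enumerate(string)' loop; early return at the last index.
-- string[index+1] is read only when index < len-1, so it is always in range; the
-- getD ' ' default is never used (PySem.List.pyGet? is exact here).
def separateGo (sym : List Char) (chars : List Char) : List (Int × Char) → List Char → List Char
  | [], result => result
  | (index, item) :: rest, result =>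
    if index == (chars.length : Int) - 1 then result ++ [item]
    else if pyLetter item && pyLetter ((PySem.List.pyGet? chars (index + 1)).getD ' ') then
      separateGo sym chars rest (result ++ item :: sym)
    else
      separateGo sym chars rest (result ++ [item])

def separate (string : String) (symbol : String) : String :=
  String.ofList (separateGo symbol.toList string.toList (PySem.List.enumerate string.toList 0) [])

-- ===== PORT B =====
-- groupby(string, key): maximal runs of equal key value, as (key, run) pairs
def runsBy (key : Char → Bool) : List Char → List (Bool × List Char)
  | [] => []
  | c :: cs =>
    (key c, c :: cs.takeWhile (fun d => key d == key c)) ::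
      runsBy key (cs.dropWhile (fun d => key d == key c))
termination_by l => l.length
decreasing_by
  simpa using Nat.lt_succ_of_le (List.length_dropWhile_le _ _)

-- the inner 'for c in run' loop with its 'first' flag
def emitRun (sym : List Char) (isL : Bool) : List Char → Bool → List Char
  | [], _ => []
  | c :: cs, first =>
    (if isL && !first then sym ++ [c] else [c]) ++ emitRun sym isL cs false

-- the outer 'for is_letter, run in groupby(...)' loop
def emitRuns (sym : List Char) : List (Bool × List Char) → List Char
  | [] => []
  | (b, run) :: rest => emitRun sym b run true ++ emitRuns sym rest

def separate_alt (string : String) (symbol : String) : String :=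
  String.ofList (emitRuns symbol.toList (runsBy pyLetter string.toList))

-- ===== PRECONDITION & SPEC =====
def Spec_separate (string : String) (symbol : String) (out : String) : Prop := out = separate_alt string symbol
instance (string : String) (symbol : String) (out : String) : Decidable (Spec_separate string symbol out) := by unfold Spec_separate; infer_instance

-- ===== CLAIM (what is proved, stated in full; the proofs are below) =====
def Claim_equal_separate : Prop := ∀ (string : String) (symbol : String), Dom_separate string symbol → Spec_separate string symbol (separate string symbol)

-- ===== LEMMAS AND PROOFS =====

-- common specification: insert sym between every adjacent pair of letters
def ins (sym : List Char) : List Char → List Char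
  | [] => []
  | [c] => [c]
  | c :: d :: r => (if pyLetter c && pyLetter d then c :: sym else [c]) ++ ins sym (d :: r)

lemma emitRuns_runsBy (sym : List Char) (key : Char → Bool)
    (hkey : key = pyLetter) :
    ∀ (cs : List Char) (c : Char), emitRuns sym (runsBy key (c :: cs)) = ins sym (c :: cs) := by
  intro cs
  induction cs with
  | nil => intro c; simp [runsBy, emitRuns, emitRun, ins]
  | cons d cs' ih =>
    intro c
    by_cases h : key d = key c
    · have h' : (key d == key c) = true := by simp [h]
      have hp : (fun e => key e == key c) = (fun e => key e == key d) := by funext e; rw [h]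
      have hrec := ih d
      rw [runsBy] at hrec
      rw [runsBy, List.takeWhile_cons, List.dropWhile_cons]
      simp only [h', if_true]
      rw [hp]
      subst hkey
      rw [ins, ← h]
      cases hd : pyLetter d <;>
        simp_all [emitRuns, emitRun, List.append_assoc]
    · have hb : (key d == key c) = false := by simp [h]
      rw [runsBy, List.takeWhile_cons, List.dropWhile_cons]
      simp only [hb, if_neg, Bool.false_eq_true, not_false_iff]
      rw [emitRuns, emitRun, emitRun, ins]
      have hand : (pyLetter c && pyLetter d) = false := by
        subst hkey
        cases hc : pyLetter c <;> cases hd : pyLetter d <;> simp_all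
      rw [hand, ih d]
      simp

lemma glue_eq_ins (sym : List Char) (l : List Char) :
    emitRuns sym (runsBy pyLetter l) = ins sym l := by
  cases l with
  | nil => simp [runsBy, emitRuns, ins]
  | cons c cs => exact emitRuns_runsBy sym pyLetter rfl cs c

lemma goA_eq_ins (sym : List Char) :
    ∀ (rest pre acc : List Char),
      separateGo sym (pre ++ rest) (PySem.List.enumerate rest (pre.length : Int)) acc
        = acc ++ ins sym rest := by
  intro rest
  induction rest with
  | nil => intro pre acc; simp [PySem.List.enumerate_nil, separateGo, ins]
  | cons c rest' ih =>
    intro pre acc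
    rw [PySem.List.enumerate_cons, separateGo]
    cases rest' with
    | nil =>
      have hidx : ((pre.length : Int) == ((pre ++ [c]).length : Int) - 1) = true := by
        simp
      rw [hidx]
      simp [ins]
    | cons d r =>
      have hidx : ((pre.length : Int) == ((pre ++ c :: d :: r).length : Int) - 1) = false := by
        simp only [beq_eq_false_iff_ne, ne_eq, List.length_append, List.length_cons]
        push_cast
        omega
      rw [hidx]
      have hget : PySem.List.pyGet? (pre ++ c :: d :: r) ((pre.length : Int) + 1) = some d := by
        have : (pre.length : Int) + 1 = ((pre ++ [c]).length : Int) := by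
          simp
        rw [this]
        have : pre ++ c :: d :: r = (pre ++ [c]) ++ d :: r := by simp
        rw [this]
        exact PySem.List.pyGet?_append_length _ _ _
      have harr : pre ++ c :: d :: r = (pre ++ [c]) ++ d :: r := by simp
      have hlen : ((pre ++ [c]).length : Int) = (pre.length : Int) + 1 := by simp
      have ihspec := ih (pre ++ [c])
      rw [hlen, ← harr] at ihspec
      simp only [Bool.false_eq_true, if_false, hget, Option.getD_some]
      rw [ins]
      by_cases hl : (pyLetter c && pyLetter d) = true
      · rw [if_pos hl, hl, if_pos rfl, ihspec (acc ++ c :: sym)]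
        simp
      · rw [if_neg hl, eq_false_of_ne_true hl]
        simp only [Bool.false_eq_true, if_false]
        rw [ihspec (acc ++ [c])]
        simp

-- ===== VERDICT (by name: the statement is the Claim_ definition above) =====
theorem separate_spec : Claim_equal_separate := by
  intro string symbol _
  unfold Spec_separate separate separate_alt
  have h := goA_eq_ins symbol.toList string.toList [] []
  simp only [List.nil_append, List.length_nil, Nat.cast_zero] at h
  rw [h, glue_eq_ins]
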